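-- pv_equiv track=rewrite | github.com/0pankajkumar/small-codes | competitiveProgramming/codechef/encoding.py | putZerosOnRepeat
-- ===== SOURCE A (Python) =====
-- def putZerosOnRepeat(a):
--     b = list(str(a))
--     temp = "X"
--     for i in range(len(b)):
--         if b[i] == temp:
--             b[i] = "0"
--         else:
--             temp = b[i]
--     c = ''.join(b)
--     return (int(c))
-- ===== SOURCE B (Python) =====
-- def putZerosOnRepeat(a):
--     # Run-based: split the digit string into maximal runs of equal chars;
--     # keep each run's first char, emit '0' for every later member of the run.
--     s = str(a)
--     parts = []
--     i = 0
--     n = len(s)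
--     while i < n:
--         j = i + 1
--         while j < n and s[j] == s[i]:
--             j += 1
--         parts.append(s[i] + '0' * (j - i - 1))
--         i = j
--     return int(''.join(parts))
-- ===== Notes on version B (the rewrite author's own statement) =====
-- stated objective: alternative
-- what changed: A's single stateful scan with a 'temp' previous-char variable is replaced by a two-pointer run decomposition: split the digit string into maximal runs of equal characters and emit each run's first character followed by zeros.
import Mathlib
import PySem

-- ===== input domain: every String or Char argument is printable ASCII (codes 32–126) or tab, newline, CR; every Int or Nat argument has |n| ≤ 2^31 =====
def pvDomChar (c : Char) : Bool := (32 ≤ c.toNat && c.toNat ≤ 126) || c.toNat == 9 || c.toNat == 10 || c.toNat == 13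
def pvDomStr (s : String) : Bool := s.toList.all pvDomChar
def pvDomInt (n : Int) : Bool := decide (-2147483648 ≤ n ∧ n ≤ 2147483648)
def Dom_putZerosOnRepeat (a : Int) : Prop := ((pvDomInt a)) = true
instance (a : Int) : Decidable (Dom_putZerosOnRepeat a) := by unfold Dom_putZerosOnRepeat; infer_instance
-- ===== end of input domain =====

-- B replaces A's stateful previous-char scan by a two-pointer run decomposition (objective: alternative).

-- ===== PORT A =====
-- A: scan str(a) with a 'temp' previous-char variable, zeroing chars equal to temp.
-- loop body: state (b, temp); 'if b[i] == temp: b[i] = "0" else: temp = b[i]'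
def pvStep (st : List Char × Char) (i : Int) : List Char × Char :=
  if PySem.List.pyGetD st.1 i 'X' = st.2 then
    (PySem.List.pySetD st.1 i '0', st.2)
  else
    (st.1, PySem.List.pyGetD st.1 i 'X')

def putZerosOnRepeat (a : Int) : Int :=
  let b := (PySem.Int.toStr a).toList
  let st := (PySem.List.pyRange 0 (b.length : Int) 1).foldl pvStep (b, 'X')
  let c := String.ofList st.1
  (PySem.Int.ofStr? c).getD 0  -- int(c); c is always a valid int literal here, so int() never raises

-- ===== PORT B =====
-- inner while loop of Source B: length of the run of chars equal to c, and the remainder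
def pvRunSplit (c : Char) : List Char → Nat × List Char
  | [] => (0, [])
  | d :: ds => if d = c then ((pvRunSplit c ds).1 + 1, (pvRunSplit c ds).2) else (0, d :: ds)

theorem pvRunSplit_snd_le (c : Char) (l : List Char) : (pvRunSplit c l).2.length ≤ l.length := by
  induction l with
  | nil => simp [pvRunSplit]
  | cons d ds ih =>
    simp only [pvRunSplit]
    split
    · simp; omega
    · simp

-- outer while loop of Source B: emit first char of each run, '0' for the rest of the run
def pvGroups : List Char → List Char
  | [] => []
  | c :: cs =>
      c :: (List.replicate (pvRunSplit c cs).1 '0' ++ pvGroups (pvRunSplit c cs).2)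
termination_by l => l.length
decreasing_by
  have := pvRunSplit_snd_le c cs
  simp; omega

def putZerosOnRepeat_alt (a : Int) : Int :=
  let s := (PySem.Int.toStr a).toList
  (PySem.Int.ofStr? (String.ofList (pvGroups s))).getD 0  -- int(); never raises here

-- ===== PRECONDITION & SPEC =====
def Spec_putZerosOnRepeat (a : Int) (out : Int) : Prop := out = putZerosOnRepeat_alt a
instance (a : Int) (out : Int) : Decidable (Spec_putZerosOnRepeat a out) := by unfold Spec_putZerosOnRepeat; infer_instance

-- ===== CLAIM (what is proved, stated in full; the proofs are below) =====
def Claim_equal_putZerosOnRepeat : Prop := ∀ (a : Int), Dom_putZerosOnRepeat a → Spec_putZerosOnRepeat a (putZerosOnRepeat a)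

-- ===== LEMMAS AND PROOFS =====

-- functional reading of A's scan: output chars and final temp
def pvScan (t : Char) : List Char → List Char
  | [] => []
  | c :: cs => if c = t then '0' :: pvScan t cs else c :: pvScan c cs

def pvTemp (t : Char) : List Char → Char
  | [] => t
  | c :: cs => if c = t then pvTemp t cs else pvTemp c cs

theorem pvLoop (rest done : List Char) (t : Char) :
    (PySem.List.pyRange (done.length : Int) ((done.length : Int) + (rest.length : Int)) 1).foldl
      pvStep (done ++ rest, t) = (done ++ pvScan t rest, pvTemp t rest) := by
  induction rest generalizing done t with
  | nil =>
    rw [PySem.List.pyRange_one_eq_nil (by simp)]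
    simp [pvScan, pvTemp]
  | cons c cs ih =>
    have hlt : (done.length : Int) < (done.length : Int) + ((c :: cs).length : Int) := by
      simp
    have hget : PySem.List.pyGetD (done ++ c :: cs) (done.length : Int) 'X' = c := by
      simp [PySem.List.pyGetD_natCast, List.getD]
    rw [PySem.List.pyRange_one_cons hlt]
    by_cases hc : c = t
    · subst hc
      have hstep : pvStep (done ++ c :: cs, c) (done.length : Int) =
          (done ++ '0' :: cs, c) := by
        simp [pvStep, hget, PySem.List.pySetD_natCast]
      simp only [List.foldl_cons, hstep, pvScan, pvTemp]
      have := ih (done ++ ['0']) c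
      simp only [List.append_assoc, List.singleton_append, List.length_append,
        List.length_singleton] at this
      simp only [List.length_cons]
      push_cast at this ⊢
      ring_nf at this ⊢
      exact this
    · have hstep : pvStep (done ++ c :: cs, t) (done.length : Int) =
          (done ++ c :: cs, c) := by
        simp [pvStep, hget, hc]
      simp only [List.foldl_cons, hstep, pvScan, pvTemp, if_neg hc]
      have := ih (done ++ [c]) c
      simp only [List.append_assoc, List.singleton_append, List.length_append,
        List.length_singleton] at this
      simp only [List.length_cons]
      push_cast at this ⊢
      ring_nf at this ⊢
      exact this

-- the scan with previous char c equals: zeros for the run of c, then the run decomposition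
theorem pvScan_runSplit (cs : List Char) (c : Char) :
    pvScan c cs = List.replicate (pvRunSplit c cs).1 '0' ++ pvGroups (pvRunSplit c cs).2 := by
  induction cs generalizing c with
  | nil => simp [pvScan, pvRunSplit]; rw [pvGroups]
  | cons d ds ih =>
    by_cases hd : d = c
    · simp only [pvScan, pvRunSplit, if_pos hd, List.replicate_succ, List.cons_append]
      rw [ih c]
    · simp only [pvScan, pvRunSplit, if_neg hd, List.replicate_zero, List.nil_append]
      rw [pvGroups, ih d]

theorem pvScan_groups (cs : List Char) (t : Char) (h : ∀ c ∈ cs, c ≠ t) :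
    pvScan t cs = pvGroups cs := by
  cases cs with
  | nil => rw [pvGroups]; rfl
  | cons c cs' =>
    have hc : c ≠ t := h c (by simp)
    simp only [pvScan, if_neg hc, pvGroups]
    rw [pvScan_runSplit]

-- str(a) contains only '-' and decimal digits, hence never 'X'
theorem pvToDigitsCore_ne (f n : Nat) (acc : List Char) (hacc : ∀ c ∈ acc, c ≠ 'X') :
    ∀ c ∈ Nat.toDigitsCore 10 f n acc, c ≠ 'X' := by
  induction f generalizing n acc with
  | zero => simpa [Nat.toDigitsCore] using hacc
  | succ f ih =>
    intro c hc
    have hd : (n % 10).digitChar ≠ 'X' := by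
      have : n % 10 < 10 := Nat.mod_lt _ (by norm_num)
      interval_cases h : n % 10 <;> decide
    simp only [Nat.toDigitsCore] at hc
    split at hc
    · rcases List.mem_cons.mp hc with h | h
      · simp [h, hd]
      · exact hacc c h
    · exact ih (n / 10) (_ :: acc) (by
        intro x hx
        rcases List.mem_cons.mp hx with h | h
        · simp [h, hd]
        · exact hacc x h) c hc

theorem pvToChars_ne (a : Int) : ∀ c ∈ PySem.Int.toChars a, c ≠ 'X' := by
  intro c hc
  simp only [PySem.Int.toChars] at hc
  split at hc
  · rcases List.mem_cons.mp hc with h | h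
    · simp [h]
    · exact pvToDigitsCore_ne _ _ [] (by simp) c h
  · exact pvToDigitsCore_ne _ _ [] (by simp) c hc

-- ===== VERDICT (by name: the statement is the Claim_ definition above) =====
theorem putZerosOnRepeat_spec : Claim_equal_putZerosOnRepeat := by
  intro a _
  unfold Spec_putZerosOnRepeat putZerosOnRepeat putZerosOnRepeat_alt
  have hchars := pvToChars_ne a
  have hl := pvLoop (PySem.Int.toChars a) [] 'X'
  simp only [List.nil_append, List.length_nil, Nat.cast_zero, zero_add] at hl
  simp only [PySem.Int.toList_toStr]
  rw [hl, pvScan_groups _ _ hchars]
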